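-- pv_equiv track=rewrite | github.com/omer-semih/graph_theory | tests/matchings_helper.py | SA_is_augmenting_path
-- ===== SOURCE A (Python) =====
-- def SA_is_alternating_path(n, edges, matching, pairs):  # pairs is a list of edges, is it an alternating path?
--     def edge_equal(edge1, edge2):
--         if edge1 == edge2:
--             return True
--         else:
--             (a, b) = edge1
--             return (b, a) == edge2
--
--     def find_edge(edge, edges):
--         # find the first edge in edges edge_equal to the given edge
--         #  or None if there isn't one
--         return next((edge2 for edge2 in edges if edge_equal(edge, edge2)), None)
--
--     def are_edges_incident(edge1, edge2):
--         (a, b) = edge1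
--         return a in edge2 or b in edge2
--
--     def is_path(n, edges, path):  # is path a valid path?
--         # i.e., is every element of path an edge in the sense of edge_equal ?
--         # and are consecutive edges adjacent ?
--         for pair in path:
--             if not next((edge for edge in edges if edge_equal(edge, pair)), False):
--                 return False
--         for i in range(len(path) - 1):
--             if not are_edges_incident(path[i], path[i + 1]):
--                 return False
--         return True
--
--     if pairs == []:
--         return True  # TODO, not sure whether this is correct
--     if not is_path(n, edges, pairs):
--         return False
--     expected_parity = find_edge(pairs[0], matching) is not None
--     for pair in pairs:
--         parity = find_edge(pair, matching) is not None
--         if parity != expected_parity: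
--             return False
--         expected_parity = not parity
--     return True
--
-- def SA_is_augmenting_path(n, edges, matching, path):
--     # path is a list of vertices
--     # matching is a list of edges, in the sense of edge_equal
--
--     def path_to_pairs(path):  # return a list of pairs of points, presumably edges
--         def loop(i, pairs):
--             if i == len(path) - 1:
--                 return pairs
--             else:
--                 return loop(i + 1, pairs + [(path[i], path[i + 1])])
--
--         return loop(0, [])
--
--     def is_free_vertex(n, matching, v):
--         # we assume that matching is a valid matching (without verifying)
--         #  is v a vertex of the graph which is not adjacent to any
--         #  edge in the matching
--         if v < 0:
--             return False
--         if v >= n: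
--             return False
--         for (a, b) in matching:
--             if a == v or b == v:
--                 return False
--         return True
--
--     if len(path) % 2 == 1:
--         return False
--     if path == []:
--         return False
--     return is_free_vertex(n, matching, path[0]) \
--         and is_free_vertex(n, matching, path[len(path) - 1]) \
--         and SA_is_alternating_path(n, edges, matching, path_to_pairs(path))
-- ===== SOURCE B (Python) =====
-- def SA_is_augmenting_path(n, edges, matching, path):
--     # Single pass over consecutive vertex pairs; pair i must be a graph edge
--     # (undirected) and must be matched exactly when i is odd.
--     def matched(u, v):
--         return any(e == (u, v) or e == (v, u) for e in matching)
--
--     def is_edge(u, v):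
--         return any(e == (u, v) or e == (v, u) for e in edges)
--
--     def free(v):
--         return 0 <= v < n and not any(v == a or v == b for (a, b) in matching)
--
--     if len(path) % 2 == 1 or path == []:
--         return False
--     if not (free(path[0]) and free(path[-1])):
--         return False
--     for i in range(len(path) - 1):
--         u, v = path[i], path[i + 1]
--         if not is_edge(u, v):
--             return False
--         if matched(u, v) != (i % 2 == 1):
--             return False
--     return True
-- ===== Notes on version B (the rewrite author's own statement) =====
-- stated objective: simpler
-- what changed: B walks consecutive vertex pairs once, checking edge membership and a parity fixed by the index, instead of A's recursively accumulated pairs list that is then scanned three times (edge-membership pass, vacuous incidence pass, parity loop seeded from the first pair).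
import Mathlib
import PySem

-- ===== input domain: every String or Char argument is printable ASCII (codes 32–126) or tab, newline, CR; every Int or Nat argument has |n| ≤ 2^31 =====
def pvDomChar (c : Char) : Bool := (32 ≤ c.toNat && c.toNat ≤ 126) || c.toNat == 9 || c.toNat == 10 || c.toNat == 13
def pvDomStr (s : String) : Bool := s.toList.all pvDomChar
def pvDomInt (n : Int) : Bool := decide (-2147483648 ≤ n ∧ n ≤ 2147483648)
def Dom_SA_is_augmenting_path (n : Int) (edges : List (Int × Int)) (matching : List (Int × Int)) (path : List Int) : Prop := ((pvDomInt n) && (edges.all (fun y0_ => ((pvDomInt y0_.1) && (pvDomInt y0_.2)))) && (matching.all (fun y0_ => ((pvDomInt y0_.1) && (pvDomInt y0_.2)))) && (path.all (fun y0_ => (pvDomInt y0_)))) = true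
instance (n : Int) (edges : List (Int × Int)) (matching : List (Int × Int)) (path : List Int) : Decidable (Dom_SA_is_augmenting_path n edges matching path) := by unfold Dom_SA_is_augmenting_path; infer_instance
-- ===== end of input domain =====

-- B replaces A's recursively accumulated pairs list and its three scans (edge check,
-- vacuous incidence check, parity loop seeded from the first pair) by one pass over
-- consecutive vertices with parity fixed by the index; objective: simpler.

-- ===== PORT A =====
-- edge_equal(edge1, edge2)
def pvEdgeEqual (e1 e2 : Int × Int) : Bool :=
  if e1 == e2 then true else (e1.2, e1.1) == e2

-- find_edge(edge, edges): first edge_equal match or None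
def pvFindEdge (e : Int × Int) (es : List (Int × Int)) : Option (Int × Int) :=
  es.find? (fun e2 => pvEdgeEqual e e2)

-- are_edges_incident(edge1, edge2): a in edge2 or b in edge2 (tuple membership)
def pvAreIncident (e1 e2 : Int × Int) : Bool :=
  (e1.1 == e2.1 || e1.1 == e2.2) || (e1.2 == e2.1 || e1.2 == e2.2)

-- is_path, first loop: every pair is (edge_equal-) present in edges.
-- (the found edge is a non-empty tuple, hence always truthy in Python)
def pvIsPathCheck1 (edges : List (Int × Int)) : List (Int × Int) → Bool
  | [] => true
  | p :: rest =>
    match edges.find? (fun e => pvEdgeEqual e p) with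
    | none => false
    | some _ => pvIsPathCheck1 edges rest

-- is_path, second loop over i in range(len(path)-1): path[i], path[i+1] incident
def pvIsPathCheck2 : List (Int × Int) → Bool
  | p1 :: p2 :: rest => if !pvAreIncident p1 p2 then false else pvIsPathCheck2 (p2 :: rest)
  | _ => true

-- parity loop of SA_is_alternating_path
def pvParityLoop (matching : List (Int × Int)) : List (Int × Int) → Bool → Bool
  | [], _ => true
  | p :: rest, expected =>
    let parity := (pvFindEdge p matching).isSome
    if parity != expected then false else pvParityLoop matching rest (!parity)

def SA_is_alternating_path (n : Int) (edges : List (Int × Int)) (matching : List (Int × Int)) (pairs : List (Int × Int)) : Bool :=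
  if pairs == [] then true
  else if !(pvIsPathCheck1 edges pairs && pvIsPathCheck2 pairs) then false
  else
    -- pairs[0]: pairs is non-empty here (the pairs == [] branch returned)
    let expected := (pvFindEdge (pairs.headD (0, 0)) matching).isSome
    pvParityLoop matching pairs expected

-- path_to_pairs' inner loop(i, pairs); only reached with len(path) ≥ 2, where i
-- counts 0..len-1, so `i < len-1` is Python's `i != len(path)-1` and both
-- indexings are in range (getD is exact there).
def pvP2PLoop (path : List Int) (i : Nat) (pairs : List (Int × Int)) : List (Int × Int) :=
  if h : i < path.length - 1 then
    pvP2PLoop path (i + 1) (pairs ++ [(path.getD i 0, path.getD (i + 1) 0)])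
  else pairs
termination_by path.length - 1 - i

-- is_free_vertex(n, matching, v)
def pvIsFree (n : Int) (matching : List (Int × Int)) (v : Int) : Bool :=
  if v < 0 then false
  else if n ≤ v then false
  else matching.all (fun ab => !(ab.1 == v || ab.2 == v))

def SA_is_augmenting_path (n : Int) (edges : List (Int × Int)) (matching : List (Int × Int)) (path : List Int) : Bool :=
  if path.length % 2 == 1 then false
  else if path == [] then false
  else
    -- path[0] and path[len(path)-1]: path is non-empty here, indices in range
    pvIsFree n matching (path.getD 0 0)
    && pvIsFree n matching (path.getD (path.length - 1) 0)
    && SA_is_alternating_path n edges matching (pvP2PLoop path 0 [])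

-- ===== PORT B =====
def pvAltMatched (matching : List (Int × Int)) (u v : Int) : Bool :=
  matching.any (fun e => e == (u, v) || e == (v, u))

def pvAltIsEdge (edges : List (Int × Int)) (u v : Int) : Bool :=
  edges.any (fun e => e == (u, v) || e == (v, u))

def pvAltFree (n : Int) (matching : List (Int × Int)) (v : Int) : Bool :=
  decide (0 ≤ v) && decide (v < n) && !matching.any (fun ab => v == ab.1 || v == ab.2)

-- Source B's loop over i, as recursion on consecutive vertices carrying the index parity
def pvAltLoop (edges matching : List (Int × Int)) : List Int → Bool → Bool
  | u :: v :: rest, odd =>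
    if !pvAltIsEdge edges u v then false
    else if pvAltMatched matching u v != odd then false
    else pvAltLoop edges matching (v :: rest) (!odd)
  | _, _ => true

def SA_is_augmenting_path_alt (n : Int) (edges : List (Int × Int)) (matching : List (Int × Int)) (path : List Int) : Bool :=
  if path.length % 2 == 1 || path == [] then false
  else if !(pvAltFree n matching (path.headD 0) && pvAltFree n matching (path.getLastD 0)) then false
  else pvAltLoop edges matching path false

-- ===== PRECONDITION & SPEC =====
def Spec_SA_is_augmenting_path (n : Int) (edges : List (Int × Int)) (matching : List (Int × Int)) (path : List Int) (out : Bool) : Prop := out = SA_is_augmenting_path_alt n edges matching path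
instance (n : Int) (edges : List (Int × Int)) (matching : List (Int × Int)) (path : List Int) (out : Bool) : Decidable (Spec_SA_is_augmenting_path n edges matching path out) := by unfold Spec_SA_is_augmenting_path; infer_instance

-- ===== CLAIM (what is proved, stated in full; the proofs are below) =====
def Claim_equal_SA_is_augmenting_path : Prop := ∀ (n : Int) (edges : List (Int × Int)) (matching : List (Int × Int)) (path : List Int), Dom_SA_is_augmenting_path n edges matching path → Spec_SA_is_augmenting_path n edges matching path (SA_is_augmenting_path n edges matching path)

-- ===== LEMMAS AND PROOFS =====

-- consecutive pairs of a vertex list (specification of path_to_pairs)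
def pvAdjPairs : List Int → List (Int × Int)
  | u :: v :: rest => (u, v) :: pvAdjPairs (v :: rest)
  | _ => []

theorem pvAdjPairs_short (xs : List Int) (h : xs.length ≤ 1) : pvAdjPairs xs = [] := by
  match xs with
  | [] => rfl
  | [u] => rfl
  | u :: v :: r => simp at h

theorem pvP2PLoop_eq (path : List Int) (i : Nat) (acc : List (Int × Int)) :
    pvP2PLoop path i acc = acc ++ pvAdjPairs (path.drop i) := by
  rw [pvP2PLoop]
  split
  · next hlt =>
    rw [pvP2PLoop_eq path (i + 1)]
    have h1 : i < path.length := by omega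
    have h2 : i + 1 < path.length := by omega
    have hd : path.drop i = path[i] :: path.drop (i + 1) :=
      List.drop_eq_getElem_cons h1
    have hd2 : path.drop (i + 1) = path[i + 1] :: path.drop (i + 2) :=
      List.drop_eq_getElem_cons h2
    rw [hd, hd2, pvAdjPairs, ← hd2]
    simp [List.getD_eq_getElem?_getD, List.getElem?_eq_getElem, h1, h2]
  · next hge =>
    rw [pvAdjPairs_short _ (by simp; omega)]
    simp
termination_by path.length - 1 - i

theorem pvCheck2_adj : ∀ xs : List Int, pvIsPathCheck2 (pvAdjPairs xs) = true
  | [] => rfl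
  | [_] => rfl
  | [_, _] => rfl
  | u :: v :: w :: r => by
    have ih := pvCheck2_adj (v :: w :: r)
    have h1 : pvAdjPairs (u :: v :: w :: r) = (u, v) :: (v, w) :: pvAdjPairs (w :: r) := rfl
    have h2 : pvAdjPairs (v :: w :: r) = (v, w) :: pvAdjPairs (w :: r) := rfl
    rw [h1, pvIsPathCheck2]
    have hinc : pvAreIncident (u, v) (v, w) = true := by simp [pvAreIncident]
    rw [hinc]
    rw [h2] at ih
    simpa using ih

-- BEq on pairs of Ints, unfolded
theorem pvBeqPair (x y c d : Int) : ((x, y) == (c, d)) = (x == c && y == d) := rfl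

theorem pvEdgeEqual_eq (e : Int × Int) (u v : Int) :
    pvEdgeEqual e (u, v) = (e == (u, v) || e == (v, u)) := by
  obtain ⟨a, b⟩ := e
  simp only [pvEdgeEqual, pvBeqPair]
  cases hau : a == u <;> cases hbv : b == v <;> cases hav : a == v <;> cases hbu : b == u <;>
    simp [hau, hbv, hav, hbu]

theorem pvFind_isSome (es : List (Int × Int)) (u v : Int) :
    (es.find? (fun e => pvEdgeEqual e (u, v))).isSome
      = es.any (fun e => e == (u, v) || e == (v, u)) := by
  induction es with
  | nil => rfl
  | cons e es ih =>
    rw [List.find?_cons, List.any_cons, pvEdgeEqual_eq]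
    cases h : (e == (u, v) || e == (v, u)) <;> simp [h, ih]

theorem pvBeqCommInt (a b : Int) : (a == b) = (b == a) := by
  by_cases h : a = b
  · simp [h]
  · simp [h, (Ne.symm h : b ≠ a)]

theorem pvEdgeEqual_eq' (u v : Int) (e : Int × Int) :
    pvEdgeEqual (u, v) e = (e == (u, v) || e == (v, u)) := by
  obtain ⟨a, b⟩ := e
  simp only [pvEdgeEqual, pvBeqPair]
  rw [pvBeqCommInt u a, pvBeqCommInt v b, pvBeqCommInt v a, pvBeqCommInt u b]
  cases h1 : a == u <;> cases h2 : b == v <;> cases h3 : a == v <;> cases h4 : b == u <;>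
    simp [h1, h2, h3, h4]

theorem pvFindEdge_isSome (m : List (Int × Int)) (u v : Int) :
    (pvFindEdge (u, v) m).isSome = pvAltMatched m u v := by
  rw [pvFindEdge, pvAltMatched]
  induction m with
  | nil => rfl
  | cons e es ih =>
    rw [List.find?_cons, List.any_cons, pvEdgeEqual_eq']
    cases h : (e == (u, v) || e == (v, u)) <;> simp [h, ih]

-- the fused loop of B equals A's two scans (edge-membership pass and parity pass)
theorem pvLoop_eq (edges matching : List (Int × Int)) :
    ∀ (xs : List Int) (b : Bool),
      (pvIsPathCheck1 edges (pvAdjPairs xs) && pvParityLoop matching (pvAdjPairs xs) b)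
        = pvAltLoop edges matching xs b
  | [], _ => rfl
  | [_], _ => rfl
  | u :: v :: rest, b => by
    have ih := pvLoop_eq edges matching (v :: rest)
    have hpairs : pvAdjPairs (u :: v :: rest) = (u, v) :: pvAdjPairs (v :: rest) := rfl
    rw [hpairs, pvAltLoop, pvIsPathCheck1, pvParityLoop]
    have he : (edges.find? (fun e => pvEdgeEqual e (u, v))).isSome = pvAltIsEdge edges u v := by
      rw [pvAltIsEdge, pvFind_isSome]
    have hm : (pvFindEdge (u, v) matching).isSome = pvAltMatched matching u v :=
      pvFindEdge_isSome matching u v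
    cases hfind : edges.find? (fun e => pvEdgeEqual e (u, v)) with
    | none =>
      have hedge : pvAltIsEdge edges u v = false := by rw [← he, hfind]; rfl
      simp [hedge]
    | some e0 =>
      have hedge : pvAltIsEdge edges u v = true := by rw [← he, hfind]; rfl
      rw [hedge]
      simp only [Bool.not_true, Bool.false_eq_true, if_false]
      rw [hm]
      by_cases hp : pvAltMatched matching u v = b
      · simp [hp, ih]
      · have hne : (pvAltMatched matching u v != b) = true := by
          cases h' : pvAltMatched matching u v <;> cases b <;> simp_all
        simp [hne]

theorem pvFree_eq (n : Int) (m : List (Int × Int)) (v : Int) :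
    pvIsFree n m v = pvAltFree n m v := by
  rw [pvIsFree, pvAltFree]
  by_cases h1 : v < 0
  · simp [h1, show ¬ (0 ≤ v) by omega]
  · by_cases h2 : n ≤ v
    · simp [h1, h2, show ¬ (v < n) by omega]
    · have hall : ∀ m' : List (Int × Int), m'.all (fun ab => !(ab.1 == v || ab.2 == v))
          = !m'.any (fun ab => v == ab.1 || v == ab.2) := by
        intro m'
        induction m' with
        | nil => rfl
        | cons x xs ih =>
          rw [List.all_cons, List.any_cons, ih, pvBeqCommInt v x.1, pvBeqCommInt v x.2]
          cases hx1 : x.1 == v <;> cases hx2 : x.2 == v <;> simp [hx1, hx2]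
      rw [if_neg h1, if_neg h2, hall m]
      simp [show (0:Int) ≤ v by omega, show v < n by omega]

-- a free endpoint cannot occur in any matching edge, so the first pair is unmatched
theorem pvFree_not_matched (n : Int) (m : List (Int × Int)) (u v : Int)
    (h : pvAltFree n m u = true) : pvAltMatched m u v = false := by
  rw [pvAltFree] at h
  rw [pvAltMatched]
  simp only [Bool.and_eq_true, Bool.not_eq_eq_eq_not, Bool.not_true, List.any_eq_false] at h ⊢
  obtain ⟨-, hall⟩ := h
  intro e he
  have h2 := hall e he
  obtain ⟨a, b⟩ := e
  have hne : u ≠ a ∧ u ≠ b := by simpa using h2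
  simp [pvBeqPair, (Ne.symm hne.1 : a ≠ u), (Ne.symm hne.2 : b ≠ u)]

theorem pvGetLast_eq (path : List Int) (h : path ≠ []) :
    path.getD (path.length - 1) 0 = path.getLastD 0 := by
  rw [List.getLastD_eq_getLast?, List.getLast?_eq_getElem?, List.getD_eq_getElem?_getD]

theorem pvMain (n : Int) (edges matching : List (Int × Int)) (path : List Int) :
    SA_is_augmenting_path n edges matching path
      = SA_is_augmenting_path_alt n edges matching path := by
  rw [SA_is_augmenting_path, SA_is_augmenting_path_alt]
  by_cases hodd : (path.length % 2 == 1) = true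
  · rw [if_pos hodd, if_pos (by simp [hodd])]
  · rw [if_neg hodd]
    by_cases hnil : path = []
    · subst hnil; rfl
    · rw [if_neg (show ¬((path == []) = true) by simp [hnil]),
          if_neg (show ¬((path.length % 2 == 1 || path == []) = true) by simp [hodd, hnil])]
      have hlen2 : 2 ≤ path.length := by
        have h1 : path ≠ [] := hnil
        rcases Nat.lt_or_ge path.length 2 with h | h
        · interval_cases hL : path.length
          · exact absurd (List.eq_nil_of_length_eq_zero hL) hnil
          · simp [hL] at hodd
        · exact h
      obtain ⟨u, v, rest, rfl⟩ : ∃ u v rest, path = u :: v :: rest := by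
        match path, hlen2 with
        | u :: v :: rest, _ => exact ⟨u, v, rest, rfl⟩
      rw [show (u :: v :: rest).getD 0 0 = u from rfl,
          pvGetLast_eq _ (by simp), pvFree_eq, pvFree_eq,
          show (u :: v :: rest).headD 0 = u from rfl]
      cases h1 : pvAltFree n matching u with
      | false => simp [h1]
      | true =>
        cases h2 : pvAltFree n matching ((u :: v :: rest).getLastD 0) with
        | false => simp [h1, h2]
        | true =>
          simp only [h1, h2, Bool.and_self, Bool.not_true, Bool.true_and,
            Bool.false_eq_true, if_false]
          rw [pvP2PLoop_eq, List.drop_zero, List.nil_append, SA_is_alternating_path]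
          have hpairs : pvAdjPairs (u :: v :: rest) = (u, v) :: pvAdjPairs (v :: rest) := rfl
          rw [if_neg (show ¬((pvAdjPairs (u :: v :: rest) == []) = true) by simp [hpairs]),
              pvCheck2_adj, Bool.and_true]
          have hhd : (pvAdjPairs (u :: v :: rest)).headD (0, 0) = (u, v) := by rw [hpairs]; rfl
          simp only [hhd, pvFindEdge_isSome, pvFree_not_matched n matching u v h1]
          rw [← pvLoop_eq edges matching (u :: v :: rest) false]
          cases hc1 : pvIsPathCheck1 edges (pvAdjPairs (u :: v :: rest)) <;> simp [hc1]

-- ===== VERDICT (by name: the statement is the Claim_ definition above) =====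
theorem SA_is_augmenting_path_spec : Claim_equal_SA_is_augmenting_path := by
  intro n edges matching path _
  unfold Spec_SA_is_augmenting_path
  exact pvMain n edges matching path
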